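-- pv_equiv track=rewrite | github.com/LingzhentaorG/TaoMeasure | backend/taomeasure/domain/file_handler.py | validate_file_format
-- ===== SOURCE A (Python) =====
-- from typing import List, Dict, Tuple, Optional, Any
--
-- def validate_file_format(file_content: str, expected_format: str) -> Tuple[bool, str]:
--     """
--     验证文件格式是否正确
--
--     Args:
--         file_content: 文件内容
--         expected_format: 期望的格式类型
--
--     Returns:
--         (是否有效, 错误信息)
--     """
--     lines = file_content.strip().split('\n')
--
--     if not lines or all(not line.strip() for line in lines):
--         return False, "文件为空"
--
--     valid_lines = [line for line in lines if line.strip()]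
--
--     if expected_format == 'geodetic_to_cartesian':
--         # 检查格式：点名 纬度 经度 大地高
--         for i, line in enumerate(valid_lines):
--             parts = line.strip().split()
--             if len(parts) < 4:
--                 return False, f"第{i+1}行格式错误：应包含点名、纬度、经度、大地高"
--             try:
--                 float(parts[1])  # 纬度
--                 float(parts[2])  # 经度
--                 float(parts[3])  # 大地高
--             except ValueError:
--                 return False, f"第{i+1}行数值格式错误"
--
--     elif expected_format == 'cartesian_to_geodetic':
--         # 检查格式：点名 X Y Z
--         for i, line in enumerate(valid_lines):
--             parts = line.strip().split()
--             if len(parts) < 4: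
--                 return False, f"第{i+1}行格式错误：应包含点名、X、Y、Z坐标"
--             try:
--                 float(parts[1])  # X
--                 float(parts[2])  # Y
--                 float(parts[3])  # Z
--             except ValueError:
--                 return False, f"第{i+1}行数值格式错误"
--
--     elif expected_format in ['gauss_forward', 'gauss_inverse']:
--         # 检查基本的点名和坐标格式
--         for i, line in enumerate(valid_lines):
--             parts = line.strip().split()
--             if len(parts) < 3:
--                 return False, f"第{i+1}行格式错误：数据不完整"
--             try:
--                 float(parts[1])
--                 float(parts[2])
--             except ValueError:
--                 return False, f"第{i+1}行数值格式错误"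
--
--     elif expected_format in ['four_param_control', 'four_param_unknown',
--                             'seven_param_control', 'seven_param_unknown']:
--         # 检查参数转换文件格式（制表符分隔）
--         for i, line in enumerate(valid_lines):
--             parts = line.strip().split('\t')
--             min_parts = 5 if 'control' in expected_format else 3
--             if 'seven_param' in expected_format:
--                 min_parts += 1 if 'control' in expected_format else 1
--
--             if len(parts) < min_parts:
--                 return False, f"第{i+1}行格式错误：数据列数不足"
--
--             # 验证数值部分
--             try:
--                 for j in range(1, len(parts)):
--                     float(parts[j])
--             except ValueError:
--                 return False, f"第{i+1}行数值格式错误"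
--
--     return True, ""
-- ===== SOURCE B (Python) =====
-- def _floatable(s):
--     try:
--         float(s)
--         return True
--     except ValueError:
--         return False
--
-- def _make_checker(sep, need, idxs, missing):
--     def chk(line):
--         parts = line.strip().split(sep)
--         if len(parts) < need:
--             return missing
--         cols = idxs if idxs is not None else range(1, len(parts))
--         return None if all(_floatable(parts[j]) for j in cols) else "数值格式错误"
--     return chk
--
-- _CHECKERS = {
--     'geodetic_to_cartesian': _make_checker(None, 4, (1, 2, 3), "格式错误：应包含点名、纬度、经度、大地高"),
--     'cartesian_to_geodetic': _make_checker(None, 4, (1, 2, 3), "格式错误：应包含点名、X、Y、Z坐标"),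
--     'gauss_forward': _make_checker(None, 3, (1, 2), "格式错误：数据不完整"),
--     'gauss_inverse': _make_checker(None, 3, (1, 2), "格式错误：数据不完整"),
--     'four_param_control': _make_checker('\t', 5, None, "格式错误：数据列数不足"),
--     'four_param_unknown': _make_checker('\t', 3, None, "格式错误：数据列数不足"),
--     'seven_param_control': _make_checker('\t', 6, None, "格式错误：数据列数不足"),
--     'seven_param_unknown': _make_checker('\t', 4, None, "格式错误：数据列数不足"),
-- }
--
-- def validate_file_format(file_content: str, expected_format: str):
--     valid = [l for l in file_content.strip().split('\n') if l.strip()]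
--     if not valid:
--         return False, "文件为空"
--     chk = _CHECKERS.get(expected_format)
--
--     def go(rest, i):
--         if not rest:
--             return True, ""
--         e = chk(rest[0]) if chk is not None else None
--         if e is not None:
--             return False, "第%d行%s" % (i, e)
--         return go(rest[1:], i + 1)
--
--     return go(valid, 1)
-- ===== Notes on version B (the rewrite author's own statement) =====
-- stated objective: alternative
-- what changed: A's four imperative early-return loops (one per format family, with inlined constants and try/except over grouped float calls) are replaced by a map of per-format line-checker closures returning an optional error suffix, a boolean all() float predicate, and a recursive traversal of the lines that assembles the message from the returned suffix.
import Mathlib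
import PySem

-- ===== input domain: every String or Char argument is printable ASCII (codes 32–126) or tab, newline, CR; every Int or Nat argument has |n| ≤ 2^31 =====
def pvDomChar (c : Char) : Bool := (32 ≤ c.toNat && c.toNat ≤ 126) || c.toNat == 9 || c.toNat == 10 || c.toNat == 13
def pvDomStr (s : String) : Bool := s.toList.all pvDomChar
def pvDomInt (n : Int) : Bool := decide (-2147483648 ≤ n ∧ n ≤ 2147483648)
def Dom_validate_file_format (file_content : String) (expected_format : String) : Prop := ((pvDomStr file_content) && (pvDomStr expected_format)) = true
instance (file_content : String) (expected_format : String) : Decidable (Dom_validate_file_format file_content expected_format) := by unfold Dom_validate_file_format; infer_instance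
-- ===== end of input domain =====

-- B replaces A's four imperative early-return validation loops by per-format line-checker
-- closures returning an optional error suffix, a boolean float predicate with all(), and a
-- recursive traversal of the lines (objective: alternative decomposition, equal return value).

-- ---- shared semantic helper: does Python's float(s) accept the string s? ----
-- (hand-ported, PySem has no float primitive; exact on the ASCII domain: optional
-- whitespace, sign, inf/infinity/nan case-insensitive, or digit/underscore grammar)
def strSplitOn (s sep : String) : List String := (PySem.Str.split? s sep).getD []

def pyWsC (c : Char) : Bool := c == ' ' || c == '\t' || c == '\n' || c == '\r' || c == '\x0b' || c == '\x0c'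

def digRest : List Char → List Char
  | [] => []
  | c :: rest =>
    if c.isDigit then digRest rest
    else if c == '_' then
      match rest with
      | [] => c :: rest
      | d :: r2 => if d.isDigit then digRest r2 else c :: d :: r2
    else c :: rest

def digPart? : List Char → Option (List Char)
  | [] => none
  | c :: rest => if c.isDigit then some (digRest rest) else none

def mantissa? (cs : List Char) : Option (List Char) :=
  match digPart? cs with
  | some r =>
    match r with
    | '.' :: r2 => match digPart? r2 with | some r3 => some r3 | none => some r2
    | _ => some r
  | none =>
    match cs with
    | '.' :: r2 => digPart? r2
    | _ => none

def expOk : List Char → Bool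
  | [] => true
  | e :: rest =>
    if e == 'e' || e == 'E' then
      let rest2 := match rest with | [] => ([] : List Char) | s :: r => if s == '+' || s == '-' then r else s :: r
      match digPart? rest2 with | some [] => true | _ => false
    else false

def pyFloatOk (s : String) : Bool :=
  let cs := s.toList.dropWhile pyWsC
  let cs := (cs.reverse.dropWhile pyWsC).reverse
  let cs := match cs with | [] => ([] : List Char) | c :: r => if c == '+' || c == '-' then r else c :: r
  let low := cs.map PySem.Chars.lowerChar
  if low == "inf".toList || low == "infinity".toList || low == "nan".toList then true
  else match mantissa? cs with | some r => expOk r | none => false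

-- ===== PORT A =====

def aLoopGeodetic : Nat → List String → Bool × String
  | _, [] => (true, "")
  | i, l :: ls =>
    let parts := PySem.Str.split₀ (PySem.Str.strip l)
    if parts.length < 4 then
      (false, "第" ++ PySem.Int.toStr (i + 1) ++ "行格式错误：应包含点名、纬度、经度、大地高")
    else if pyFloatOk (parts.getD 1 "") && pyFloatOk (parts.getD 2 "") && pyFloatOk (parts.getD 3 "") then
      aLoopGeodetic (i + 1) ls
    else (false, "第" ++ PySem.Int.toStr (i + 1) ++ "行数值格式错误")

def aLoopCartesian : Nat → List String → Bool × String
  | _, [] => (true, "")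
  | i, l :: ls =>
    let parts := PySem.Str.split₀ (PySem.Str.strip l)
    if parts.length < 4 then
      (false, "第" ++ PySem.Int.toStr (i + 1) ++ "行格式错误：应包含点名、X、Y、Z坐标")
    else if pyFloatOk (parts.getD 1 "") && pyFloatOk (parts.getD 2 "") && pyFloatOk (parts.getD 3 "") then
      aLoopCartesian (i + 1) ls
    else (false, "第" ++ PySem.Int.toStr (i + 1) ++ "行数值格式错误")

def aLoopGauss : Nat → List String → Bool × String
  | _, [] => (true, "")
  | i, l :: ls =>
    let parts := PySem.Str.split₀ (PySem.Str.strip l)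
    if parts.length < 3 then
      (false, "第" ++ PySem.Int.toStr (i + 1) ++ "行格式错误：数据不完整")
    else if pyFloatOk (parts.getD 1 "") && pyFloatOk (parts.getD 2 "") then
      aLoopGauss (i + 1) ls
    else (false, "第" ++ PySem.Int.toStr (i + 1) ++ "行数值格式错误")

def aLoopParam (ef : String) : Nat → List String → Bool × String
  | _, [] => (true, "")
  | i, l :: ls =>
    let parts := strSplitOn (PySem.Str.strip l) "\t"
    let min_parts : Nat := if PySem.Str.isIn "control" ef then 5 else 3
    let min_parts : Nat :=
      if PySem.Str.isIn "seven_param" ef then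
        (if PySem.Str.isIn "control" ef then min_parts + 1 else min_parts + 1)
      else min_parts
    if parts.length < min_parts then
      (false, "第" ++ PySem.Int.toStr (i + 1) ++ "行格式错误：数据列数不足")
    else if (List.range' 1 (parts.length - 1)).all (fun j => pyFloatOk (parts.getD j "")) then
      aLoopParam ef (i + 1) ls
    else (false, "第" ++ PySem.Int.toStr (i + 1) ++ "行数值格式错误")

def validate_file_format (file_content : String) (expected_format : String) : Bool × String :=
  let lines := strSplitOn (PySem.Str.strip file_content) "\n"
  if lines.isEmpty || lines.all (fun l => PySem.Str.strip l == "") then (false, "文件为空")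
  else
    let valid_lines := lines.filter (fun l => !(PySem.Str.strip l == ""))
    if expected_format == "geodetic_to_cartesian" then aLoopGeodetic 0 valid_lines
    else if expected_format == "cartesian_to_geodetic" then aLoopCartesian 0 valid_lines
    else if expected_format == "gauss_forward" || expected_format == "gauss_inverse" then
      aLoopGauss 0 valid_lines
    else if expected_format == "four_param_control" || expected_format == "four_param_unknown"
         || expected_format == "seven_param_control" || expected_format == "seven_param_unknown" then
      aLoopParam expected_format 0 valid_lines
    else (true, "")

-- ===== PORT B =====

def bFloatable (s : String) : Bool := pyFloatOk s

def bMakeChecker (sep : Option String) (need : Nat) (idxs : Option (List Nat)) (missing : String) :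
    String → Option String := fun line =>
  let parts := match sep with
    | none => PySem.Str.split₀ (PySem.Str.strip line)
    | some s => strSplitOn (PySem.Str.strip line) s
  if parts.length < need then some missing
  else
    let cols := match idxs with | some c => c | none => List.range' 1 (parts.length - 1)
    if cols.all (fun j => bFloatable (parts.getD j "")) then none else some "数值格式错误"

def bCheckers : PySem.Dict String (String → Option String) :=
  PySem.Dict.ofList
    [ ("geodetic_to_cartesian", bMakeChecker none 4 (some [1, 2, 3]) "格式错误：应包含点名、纬度、经度、大地高")
    , ("cartesian_to_geodetic", bMakeChecker none 4 (some [1, 2, 3]) "格式错误：应包含点名、X、Y、Z坐标")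
    , ("gauss_forward", bMakeChecker none 3 (some [1, 2]) "格式错误：数据不完整")
    , ("gauss_inverse", bMakeChecker none 3 (some [1, 2]) "格式错误：数据不完整")
    , ("four_param_control", bMakeChecker (some "\t") 5 none "格式错误：数据列数不足")
    , ("four_param_unknown", bMakeChecker (some "\t") 3 none "格式错误：数据列数不足")
    , ("seven_param_control", bMakeChecker (some "\t") 6 none "格式错误：数据列数不足")
    , ("seven_param_unknown", bMakeChecker (some "\t") 4 none "格式错误：数据列数不足") ]

def bGo (chk : Option (String → Option String)) : List String → Nat → Bool × String
  | [], _ => (true, "")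
  | l :: ls, i =>
    match (match chk with | some f => f l | none => none) with
    | some e => (false, "第" ++ PySem.Int.toStr i ++ "行" ++ e)
    | none => bGo chk ls (i + 1)

def validate_file_format_alt (file_content : String) (expected_format : String) : Bool × String :=
  let valid := (strSplitOn (PySem.Str.strip file_content) "\n").filter (fun l => !(PySem.Str.strip l == ""))
  if valid.isEmpty then (false, "文件为空")
  else bGo (PySem.Dict.get? bCheckers expected_format) valid 1

-- ===== PRECONDITION & SPEC =====
def Spec_validate_file_format (file_content : String) (expected_format : String) (out : Bool × String) : Prop := out = validate_file_format_alt file_content expected_format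
instance (file_content : String) (expected_format : String) (out : Bool × String) : Decidable (Spec_validate_file_format file_content expected_format out) := by unfold Spec_validate_file_format; infer_instance

-- ===== CLAIM (what is proved, stated in full; the proofs are below) =====
def Claim_equal_validate_file_format : Prop := ∀ (file_content : String) (expected_format : String), Dom_validate_file_format file_content expected_format → Spec_validate_file_format file_content expected_format (validate_file_format file_content expected_format)

-- ===== LEMMAS AND PROOFS =====

lemma valid_empty (ls : List String) :
    (ls.filter (fun l => !(PySem.Str.strip l == ""))).isEmpty
      = ls.all (fun l => PySem.Str.strip l == "") := by
  induction ls with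
  | nil => rfl
  | cons x xs ih =>
    by_cases h : PySem.Str.strip x == "" <;> simp [List.filter, h, ih]

lemma isEmpty_or_all (ls : List String) :
    (ls.isEmpty || ls.all (fun l => PySem.Str.strip l == ""))
      = ls.all (fun l => PySem.Str.strip l == "") := by
  cases ls <;> simp

lemma geo_eq (ls : List String) (i : Nat) :
    aLoopGeodetic i ls =
      bGo (some (bMakeChecker none 4 (some [1, 2, 3]) "格式错误：应包含点名、纬度、经度、大地高")) ls (i + 1) := by
  induction ls generalizing i with
  | nil => rfl
  | cons l ls ih =>
    simp only [aLoopGeodetic, bGo, bMakeChecker, bFloatable, List.all_cons, List.all_nil,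
      Bool.and_true, Bool.and_assoc]
    split_ifs <;> simp [ih, String.append_assoc]

lemma cart_eq (ls : List String) (i : Nat) :
    aLoopCartesian i ls =
      bGo (some (bMakeChecker none 4 (some [1, 2, 3]) "格式错误：应包含点名、X、Y、Z坐标")) ls (i + 1) := by
  induction ls generalizing i with
  | nil => rfl
  | cons l ls ih =>
    simp only [aLoopCartesian, bGo, bMakeChecker, bFloatable, List.all_cons, List.all_nil,
      Bool.and_true, Bool.and_assoc]
    split_ifs <;> simp [ih, String.append_assoc]

lemma gauss_eq (ls : List String) (i : Nat) :
    aLoopGauss i ls =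
      bGo (some (bMakeChecker none 3 (some [1, 2]) "格式错误：数据不完整")) ls (i + 1) := by
  induction ls generalizing i with
  | nil => rfl
  | cons l ls ih =>
    simp only [aLoopGauss, bGo, bMakeChecker, bFloatable, List.all_cons, List.all_nil, Bool.and_true]
    split_ifs <;> simp [ih, String.append_assoc]

lemma param_eq (ef : String) (mp : Nat)
    (h : (if PySem.Str.isIn "seven_param" ef then
            (if PySem.Str.isIn "control" ef then (if PySem.Str.isIn "control" ef then (5 : Nat) else 3) + 1
             else (if PySem.Str.isIn "control" ef then (5 : Nat) else 3) + 1)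
          else (if PySem.Str.isIn "control" ef then (5 : Nat) else 3)) = mp)
    (ls : List String) (i : Nat) :
    aLoopParam ef i ls = bGo (some (bMakeChecker (some "\t") mp none "格式错误：数据列数不足")) ls (i + 1) := by
  induction ls generalizing i with
  | nil => rfl
  | cons l ls ih =>
    simp only [aLoopParam, bGo, bMakeChecker, bFloatable, h]
    split_ifs <;> simp [ih, String.append_assoc]

lemma bGo_none (ls : List String) (i : Nat) : bGo none ls i = (true, "") := by
  induction ls generalizing i with
  | nil => rfl
  | cons l ls ih => simpa [bGo] using ih (i + 1)

lemma bCheckers_items : bCheckers.items =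
    [ ("geodetic_to_cartesian", bMakeChecker none 4 (some [1, 2, 3]) "格式错误：应包含点名、纬度、经度、大地高")
    , ("cartesian_to_geodetic", bMakeChecker none 4 (some [1, 2, 3]) "格式错误：应包含点名、X、Y、Z坐标")
    , ("gauss_forward", bMakeChecker none 3 (some [1, 2]) "格式错误：数据不完整")
    , ("gauss_inverse", bMakeChecker none 3 (some [1, 2]) "格式错误：数据不完整")
    , ("four_param_control", bMakeChecker (some "\t") 5 none "格式错误：数据列数不足")
    , ("four_param_unknown", bMakeChecker (some "\t") 3 none "格式错误：数据列数不足")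
    , ("seven_param_control", bMakeChecker (some "\t") 6 none "格式错误：数据列数不足")
    , ("seven_param_unknown", bMakeChecker (some "\t") 4 none "格式错误：数据列数不足") ] := by
  simp [bCheckers, PySem.Dict.ofList, PySem.Dict.update, PySem.Dict.insert, PySem.Dict.contains,
    PySem.Dict.empty, List.foldl]

-- ===== VERDICT (by name: the statement is the Claim_ definition above) =====
set_option maxHeartbeats 1000000 in
theorem validate_file_format_spec : Claim_equal_validate_file_format := by
  intro fc ef _
  simp only [Spec_validate_file_format, validate_file_format, validate_file_format_alt,
    valid_empty, isEmpty_or_all]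
  by_cases hall : (strSplitOn (PySem.Str.strip fc) "\n").all (fun l => PySem.Str.strip l == "")
  · rw [hall, if_pos rfl, if_pos rfl]
  · rw [Bool.not_eq_true] at hall
    rw [hall]
    simp only [Bool.false_eq_true, if_false]
    set vl := (strSplitOn (PySem.Str.strip fc) "\n").filter (fun l => !(PySem.Str.strip l == "")) with hvl
    by_cases h1 : ef = "geodetic_to_cartesian"
    · subst h1
      have hg : PySem.Dict.get? bCheckers "geodetic_to_cartesian" = some (bMakeChecker none 4 (some [1, 2, 3]) "格式错误：应包含点名、纬度、经度、大地高") := by simp [PySem.Dict.get?, bCheckers_items]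
      rw [if_pos (by decide), hg]
      exact geo_eq vl 0
    · by_cases h2 : ef = "cartesian_to_geodetic"
      · subst h2
        have hg : PySem.Dict.get? bCheckers "cartesian_to_geodetic" = some (bMakeChecker none 4 (some [1, 2, 3]) "格式错误：应包含点名、X、Y、Z坐标") := by simp [PySem.Dict.get?, bCheckers_items]
        rw [if_neg (by decide), if_pos (by decide), hg]
        exact cart_eq vl 0
      · by_cases h3 : ef = "gauss_forward"
        · subst h3
          have hg : PySem.Dict.get? bCheckers "gauss_forward" = some (bMakeChecker none 3 (some [1, 2]) "格式错误：数据不完整") := by simp [PySem.Dict.get?, bCheckers_items]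
          rw [if_neg (by decide), if_neg (by decide), if_pos (by decide), hg]
          exact gauss_eq vl 0
        · by_cases h4 : ef = "gauss_inverse"
          · subst h4
            have hg : PySem.Dict.get? bCheckers "gauss_inverse" = some (bMakeChecker none 3 (some [1, 2]) "格式错误：数据不完整") := by simp [PySem.Dict.get?, bCheckers_items]
            rw [if_neg (by decide), if_neg (by decide), if_pos (by decide), hg]
            exact gauss_eq vl 0
          · by_cases h5 : ef = "four_param_control"
            · subst h5
              have hg : PySem.Dict.get? bCheckers "four_param_control" = some (bMakeChecker (some "\t") 5 none "格式错误：数据列数不足") := by simp [PySem.Dict.get?, bCheckers_items]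
              rw [if_neg (by decide), if_neg (by decide), if_neg (by decide), if_pos (by decide), hg]
              exact param_eq _ 5 (by decide) vl 0
            · by_cases h6 : ef = "four_param_unknown"
              · subst h6
                have hg : PySem.Dict.get? bCheckers "four_param_unknown" = some (bMakeChecker (some "\t") 3 none "格式错误：数据列数不足") := by simp [PySem.Dict.get?, bCheckers_items]
                rw [if_neg (by decide), if_neg (by decide), if_neg (by decide), if_pos (by decide), hg]
                exact param_eq _ 3 (by decide) vl 0
              · by_cases h7 : ef = "seven_param_control"
                · subst h7
                  have hg : PySem.Dict.get? bCheckers "seven_param_control" = some (bMakeChecker (some "\t") 6 none "格式错误：数据列数不足") := by simp [PySem.Dict.get?, bCheckers_items]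
                  rw [if_neg (by decide), if_neg (by decide), if_neg (by decide), if_pos (by decide), hg]
                  exact param_eq _ 6 (by decide) vl 0
                · by_cases h8 : ef = "seven_param_unknown"
                  · subst h8
                    have hg : PySem.Dict.get? bCheckers "seven_param_unknown" = some (bMakeChecker (some "\t") 4 none "格式错误：数据列数不足") := by simp [PySem.Dict.get?, bCheckers_items]
                    rw [if_neg (by decide), if_neg (by decide), if_neg (by decide), if_pos (by decide), hg]
                    exact param_eq _ 4 (by decide) vl 0
                  · have hk : bCheckers.keys = ["geodetic_to_cartesian", "cartesian_to_geodetic",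
                        "gauss_forward", "gauss_inverse", "four_param_control", "four_param_unknown",
                        "seven_param_control", "seven_param_unknown"] := by simp [PySem.Dict.keys, bCheckers_items]
                    have h0 : PySem.Dict.get? bCheckers ef = none := by
                      rw [PySem.Dict.get?_eq_none_iff_not_mem_keys, hk]
                      simp [h1, h2, h3, h4, h5, h6, h7, h8]
                    simp [h0, h1, h2, h3, h4, h5, h6, h7, h8, bGo_none]
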